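-- pv_equiv track=rewrite | github.com/shreyanshjaiswal2009/Alternating_Median_Abundancy_Index | Alternating_Median_Abundancy_Index.py | alternating_divisor_sum
-- ===== SOURCE A (Python) =====
-- def alternating_divisor_sum(n,divisors):
--     total = 0
--     for i, d in enumerate(divisors[n], start=1):
--         if i % 2 == 0: #Eveny 2nd term in the divisor sum is a -ve.
--             total -= d
--         else:
--             total += d
--     return abs(total) #To get $\chi(n)$.
-- ===== SOURCE B (Python) =====
-- def alternating_divisor_sum(n, divisors):
--     ds = divisors[n]
--     return abs(sum(ds) - 2 * sum(ds[1::2]))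
-- ===== Notes on version B (the rewrite author's own statement) =====
-- stated objective: simpler
-- what changed: Replaces the indexed accumulator loop with a parity branch by two library summations and an algebraic identity: the alternating sum equals sum(ds) minus twice the sum of the odd-indexed slice ds[1::2], so B computes abs(sum(ds) - 2*sum(ds[1::2])) with no loop, index or branch of its own.
import Mathlib
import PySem

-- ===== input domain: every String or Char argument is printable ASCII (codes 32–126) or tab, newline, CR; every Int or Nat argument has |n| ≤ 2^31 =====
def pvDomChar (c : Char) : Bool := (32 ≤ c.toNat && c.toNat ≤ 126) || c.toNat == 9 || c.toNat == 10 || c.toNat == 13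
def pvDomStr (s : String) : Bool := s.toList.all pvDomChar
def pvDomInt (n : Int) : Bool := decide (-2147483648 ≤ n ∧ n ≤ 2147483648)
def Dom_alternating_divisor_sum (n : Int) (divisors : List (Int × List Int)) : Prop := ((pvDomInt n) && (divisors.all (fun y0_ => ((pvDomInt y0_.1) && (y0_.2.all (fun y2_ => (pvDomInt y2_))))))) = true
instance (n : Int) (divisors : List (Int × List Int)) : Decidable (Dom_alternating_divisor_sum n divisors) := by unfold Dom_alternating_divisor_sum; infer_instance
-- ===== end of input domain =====

-- B replaces A's single indexed loop with a parity branch by two library summations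
-- combined through the identity alt-sum = sum(ds) - 2*sum(ds[1::2]) (objective: simpler).
-- Equal on Pre_ (key present in the dict).

-- ===== PORT A =====
-- total accumulated over enumerate(divisors[n], start=1) with the parity branch, then abs
def alternating_divisor_sum (n : Int) (divisors : List (Int × List Int)) : Int :=
  match PySem.Dict.get? (PySem.Dict.mk divisors) n with
  | none => 0   -- Python raises KeyError here; excluded by Pre_
  | some ds =>
    |(PySem.List.enumerate ds 1).foldl
      (fun total p => if p.1 % 2 == 0 then total - p.2 else total + p.2) 0|

-- ===== PORT B =====
-- abs(sum(ds) - 2 * sum(ds[1::2]))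
def alternating_divisor_sum_alt (n : Int) (divisors : List (Int × List Int)) : Int :=
  match PySem.Dict.get? (PySem.Dict.mk divisors) n with
  | none => 0   -- Python raises KeyError here; excluded by Pre_
  | some ds =>
    match PySem.List.slice? ds (some 1) none 2 with
    | none => 0   -- unreachable: the step 2 is nonzero
    | some odd => |ds.sum - 2 * odd.sum|

-- ===== PRECONDITION & SPEC =====
-- A (and B) raise KeyError when n is not a key of divisors; Pre_ requires the key to be present.
def Pre_alternating_divisor_sum (n : Int) (divisors : List (Int × List Int)) : Prop :=
  n ∈ divisors.map Prod.fst
instance (n : Int) (divisors : List (Int × List Int)) : Decidable (Pre_alternating_divisor_sum n divisors) := by unfold Pre_alternating_divisor_sum; infer_instance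

def pvWitness_alternating_divisor_sum : Int × (List (Int × List Int)) := (6, [(6, [1, 2, 3, 6])])

def Spec_alternating_divisor_sum (n : Int) (divisors : List (Int × List Int)) (out : Int) : Prop := out = alternating_divisor_sum_alt n divisors
instance (n : Int) (divisors : List (Int × List Int)) (out : Int) : Decidable (Spec_alternating_divisor_sum n divisors out) := by unfold Spec_alternating_divisor_sum; infer_instance

-- ===== CLAIM (what is proved, stated in full; the proofs are below) =====
def Claim_equal_alternating_divisor_sum : Prop := ∀ (n : Int) (divisors : List (Int × List Int)), Dom_alternating_divisor_sum n divisors → Pre_alternating_divisor_sum n divisors → Spec_alternating_divisor_sum n divisors (alternating_divisor_sum n divisors)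

-- ===== LEMMAS AND PROOFS =====

-- the elements of a list at odd positions 1, 3, 5, …
def pvOddElems {α : Type} : List α → List α
  | [] => []
  | [_] => []
  | _ :: b :: rest => b :: pvOddElems rest

-- filterMap over range of half the length picks out the odd-position elements
theorem pvFM {α : Type} : ∀ (ds : List α),
    (List.range (ds.length / 2)).filterMap (fun k => ds[1 + 2 * k]?) = pvOddElems ds
  | [] => by simp [pvOddElems]
  | [_] => by simp [pvOddElems]
  | a :: b :: rest => by
    have hlen : (a :: b :: rest).length / 2 = rest.length / 2 + 1 := by
      simp [List.length_cons]; omega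
    rw [hlen, List.range_succ_eq_map, List.filterMap_cons, List.filterMap_map]
    rw [show (a :: b :: rest)[1 + 2 * 0]? = some b from rfl]
    have hstep : ∀ k : Nat, (a :: b :: rest)[1 + 2 * Nat.succ k]? = rest[1 + 2 * k]? := by
      intro k
      have h : 1 + 2 * Nat.succ k = (1 + 2 * k) + 1 + 1 := by omega
      rw [h, List.getElem?_cons_succ, List.getElem?_cons_succ]
    simp only [Function.comp_def, hstep]
    rw [pvFM rest]
    rfl

theorem pvSlice?_odd {α : Type} (ds : List α) :
    PySem.List.slice? ds (some 1) none 2 = some (pvOddElems ds) := by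
  match ds with
  | [] => rfl
  | [a] => rfl
  | a :: b :: rest =>
    unfold PySem.List.slice? PySem.List.sliceIndices
    simp only [if_neg (by norm_num : ¬ (2:Int) = 0)]
    have hlen : ((a :: b :: rest).length : Int) = (rest.length : Int) + 2 := by
      simp [List.length_cons]; ring
    have hmin : min (1 : Int) ((a :: b :: rest).length : Int) = 1 := by omega
    norm_num [hmin, hlen]
    have hmin2 : min (1 : Int) ((rest.length : Int) + 1 + 1) = 1 := by omega
    simp only [hmin2]
    have hcount : (((rest.length : Int) + 1 + 1 - 1 + 2 - 1) / 2).toNat = (rest.length + 2) / 2 := by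
      omega
    simp only [hcount]
    have hidx : ∀ x : Nat, ((1 : Int) + 2 * (x : Int)).toNat = 1 + 2 * x := by intro x; omega
    simp only [hidx]
    have h := pvFM (a :: b :: rest)
    simp only [List.length_cons] at h
    have h2 : rest.length + 1 + 1 = rest.length + 2 := by omega
    rw [h2] at h
    exact h

-- A's fold over enumerate from any odd start equals sum - 2 * odd-position sum
theorem pvFold_eq : ∀ (ds : List Int) (k : Nat) (total : Int),
    (PySem.List.enumerate ds (2 * (k : Int) + 1)).foldl
      (fun total p => if p.1 % 2 == 0 then total - p.2 else total + p.2) total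
      = total + ds.sum - 2 * (pvOddElems ds).sum
  | [], k, total => by simp [PySem.List.enumerate_nil, pvOddElems]
  | [a], k, total => by
    simp only [PySem.List.enumerate_cons, PySem.List.enumerate_nil, List.foldl, pvOddElems]
    have h : (2 * (k : Int) + 1) % 2 = 1 := by omega
    simp only [h, beq_iff_eq, one_ne_zero, if_false, List.sum_cons, List.sum_nil]
    ring
  | a :: b :: rest, k, total => by
    simp only [PySem.List.enumerate_cons, List.foldl, pvOddElems]
    have h1 : ((2 * (k : Int) + 1) % 2 == 0) = false := by
      have h : (2 * (k : Int) + 1) % 2 = 1 := by omega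
      simp [h]
    have h2 : ((2 * (k : Int) + 1 + 1) % 2 == 0) = true := by
      have h : (2 * (k : Int) + 1 + 1) % 2 = 0 := by omega
      simp [h]
    have h3 : 2 * (k : Int) + 1 + 1 + 1 = 2 * (((k + 1 : Nat) : Int)) + 1 := by push_cast; ring
    rw [h3]
    simp only [h1, h2, if_true, Bool.false_eq_true, if_false]
    rw [pvFold_eq rest (k + 1) (total + a - b)]
    simp [List.sum_cons]; ring

-- ===== VERDICT (by name: the statement is the Claim_ definition above) =====
theorem alternating_divisor_sum_spec : Claim_equal_alternating_divisor_sum := by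
  intro n divisors _ _
  unfold Spec_alternating_divisor_sum alternating_divisor_sum alternating_divisor_sum_alt
  cases PySem.Dict.get? (PySem.Dict.mk divisors) n with
  | none => rfl
  | some ds =>
    dsimp only
    rw [pvSlice?_odd ds]
    have h := pvFold_eq ds 0 0
    simp only [Nat.cast_zero, mul_zero, zero_add, zero_add] at h
    simp only [h]
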